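-- pv_equiv track=rewrite | github.com/jd-develop/SNT-NSI | NSI/terminale/2024-03/2024-03-21/tictactoeai.py | num2jeu
-- ===== SOURCE A (Python) =====
-- def num2jeu(num: int) -> list[list[int]]:
--     """Renvoie une grille"""
--     assert num < 3**10
--     jeu = [[0]*3 for _ in range(3)]
--     for i in range(2, -1, -1):
--         for j in range(2, -1, -1):
--             q, r = divmod(num, 3)
--             num = q
--             jeu[i][j] = r
--     return jeu
-- ===== SOURCE B (Python) =====
-- def num2jeu(num: int) -> list[list[int]]:
--     """Renvoie une grille"""
--     assert num < 3**10
--     return [[(num // 3 ** (8 - (3 * i + j))) % 3 for j in range(3)]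
--             for i in range(3)]
-- ===== Notes on version B (the rewrite author's own statement) =====
-- stated objective: idiomatic
-- what changed: Each cell is computed independently from its base-3 place value ((num // 3**(8-(3*i+j))) % 3) in a double comprehension, instead of threading a running divmod quotient through nested reverse loops that mutate a pre-built grid.
import Mathlib
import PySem

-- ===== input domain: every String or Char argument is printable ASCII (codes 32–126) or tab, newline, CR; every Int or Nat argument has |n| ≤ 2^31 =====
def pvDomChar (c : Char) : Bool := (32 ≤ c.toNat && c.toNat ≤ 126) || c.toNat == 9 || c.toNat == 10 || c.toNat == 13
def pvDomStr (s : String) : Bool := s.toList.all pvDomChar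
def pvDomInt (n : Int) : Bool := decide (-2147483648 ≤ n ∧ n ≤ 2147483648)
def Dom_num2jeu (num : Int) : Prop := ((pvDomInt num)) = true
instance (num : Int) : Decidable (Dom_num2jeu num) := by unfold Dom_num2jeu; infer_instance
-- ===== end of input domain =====

-- B replaces the quotient-threading nested divmod loop by a double comprehension
-- reading each cell directly from its base-3 place value (idiomatic, same cost).

-- ===== PORT A =====
-- jeu[i][j] = r is ported as List.set on .toNat indices; here i,j ∈ {0,1,2} (from
-- range(2,-1,-1)), so this is exact: no negative or out-of-range index ever occurs.
def num2jeu (num : Int) : List (List Int) :=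
  let jeu : List (List Int) := (List.range 3).map (fun _ => [0, 0, 0])
  let res := (PySem.List.pyRange 2 (-1) (-1)).foldl (fun st i =>
    (PySem.List.pyRange 2 (-1) (-1)).foldl (fun st j =>
      let q := PySem.Int.floordiv st.1 3
      let r := PySem.Int.mod st.1 3
      (q, st.2.set i.toNat ((st.2.getD i.toNat []).set j.toNat r))) st) (num, jeu)
  res.2

-- ===== PORT B =====
-- the exponent 8-(3*i+j) is ≥ 0 for i,j ∈ {0,1,2}, so .toNat is exact.
def num2jeu_alt (num : Int) : List (List Int) :=
  (PySem.List.pyRange 0 3 1).map (fun i =>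
    (PySem.List.pyRange 0 3 1).map (fun j =>
      PySem.Int.mod (PySem.Int.floordiv num ((3 : Int) ^ (8 - (3 * i + j)).toNat)) 3))

-- ===== PRECONDITION & SPEC =====
-- Pre_ excludes exactly num ≥ 3^10 = 59049, where A's (and B's) assert raises AssertionError.
def Pre_num2jeu (num : Int) : Prop := num < 59049
instance (num : Int) : Decidable (Pre_num2jeu num) := by unfold Pre_num2jeu; infer_instance
def pvWitness_num2jeu : Int := 12345

def Spec_num2jeu (num : Int) (out : List (List Int)) : Prop := out = num2jeu_alt num
instance (num : Int) (out : List (List Int)) : Decidable (Spec_num2jeu num out) := by unfold Spec_num2jeu; infer_instance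

-- ===== CLAIM (what is proved, stated in full; the proofs are below) =====
def Claim_equal_num2jeu : Prop := ∀ (num : Int), Dom_num2jeu num → Pre_num2jeu num → Spec_num2jeu num (num2jeu num)

-- ===== LEMMAS AND PROOFS =====
-- (the two ports unfold to nine closed cell equations; Int.ediv_ediv_of_nonneg collapses
--  the chained quotients num/3/3/…/3 into the single division num/3^k of port B)

-- ===== VERDICT (by name: the statement is the Claim_ definition above) =====
theorem num2jeu_spec : Claim_equal_num2jeu := by
  intro num _ _
  unfold Spec_num2jeu num2jeu num2jeu_alt
  simp [PySem.List.pyRange, PySem.Int.mod_eq_emod_of_pos, PySem.Int.floordiv_eq_ediv_of_pos]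
  simp [List.range_succ, List.foldl]
  simp [Int.ediv_ediv_of_nonneg]
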